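-- pv_equiv track=rewrite | github.com/LicAiBeerLab/auto-robotics-design | testing_ground/singular_hell/workspace_run.py | reduce_constr_dict
-- ===== SOURCE A (Python) =====
-- import copy
--
-- def reduce_constr_dict(constr_dict, n_jp_to_leave):
--     new_dict = copy.deepcopy(constr_dict)
--     counter = 0
--     for k,v in new_dict.items():
--         if v['optim']:
--             if counter >= n_jp_to_leave:
--                 new_dict[k]['optim'] = False
--             counter += 1
--
--     return new_dict, counter >= n_jp_to_leave
-- ===== SOURCE B (Python) =====
-- import copy
--
-- def reduce_constr_dict(constr_dict, n_jp_to_leave):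
--     new_dict = copy.deepcopy(constr_dict)
--     optim_keys = [k for k, v in new_dict.items() if v['optim']]
--     for k in optim_keys[max(n_jp_to_leave, 0):]:
--         new_dict[k]['optim'] = False
--     return new_dict, len(optim_keys) >= n_jp_to_leave
-- ===== Notes on version B (the rewrite author's own statement) =====
-- stated objective: simpler
-- what changed: Replaces the interleaved count-and-toggle single pass with a comprehension collecting the optim keys and a slice-driven second pass that disables exactly the keys past the (clamped) threshold.
import Mathlib
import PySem

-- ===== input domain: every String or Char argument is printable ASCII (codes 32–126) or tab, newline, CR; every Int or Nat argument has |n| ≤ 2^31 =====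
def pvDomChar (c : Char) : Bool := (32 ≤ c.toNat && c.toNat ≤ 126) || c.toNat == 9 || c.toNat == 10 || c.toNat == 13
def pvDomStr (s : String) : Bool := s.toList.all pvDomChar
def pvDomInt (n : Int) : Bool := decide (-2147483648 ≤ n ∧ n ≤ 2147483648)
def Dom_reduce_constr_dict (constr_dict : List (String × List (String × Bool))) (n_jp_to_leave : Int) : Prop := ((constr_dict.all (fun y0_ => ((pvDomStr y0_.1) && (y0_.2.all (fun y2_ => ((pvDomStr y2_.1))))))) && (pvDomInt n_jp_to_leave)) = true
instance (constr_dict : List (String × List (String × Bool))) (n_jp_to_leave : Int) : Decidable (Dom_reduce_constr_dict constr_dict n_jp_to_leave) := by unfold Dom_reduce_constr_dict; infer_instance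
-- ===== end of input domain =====

-- B replaces A's interleaved count-and-toggle pass by a key-collecting comprehension plus a
-- slice-driven disabling pass (objective: simpler). A mutates the deep copy only; the input dict
-- itself is not mutated by either program.


-- ===== PORT A =====
-- shared inner-dict primitives (both Pythons do v['optim'] and new_dict[k]['optim'] = False):
-- v['optim'] on the association-list encoding: first match ('.getD false' is only reached where
-- Pre_ fails, since Python raises KeyError there)
def lookupOptim : List (String × Bool) → Option Bool
  | [] => none
  | (k, b) :: r => if k = "optim" then some b else lookupOptim r

-- v['optim'] = False: overwrite the first "optim" entry in place (dict overwrite keeps position)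
def setOptimFalse : List (String × Bool) → List (String × Bool)
  | [] => []
  | (k, b) :: r => if k = "optim" then (k, false) :: r else (k, b) :: setOptimFalse r

-- A's for-loop: each entry is tested, possibly disabled (the mutation new_dict[k]['optim'] = False
-- only touches the current entry, exact because Pre_ gives distinct outer keys), counter threaded
def aLoop (n : Int) : List (String × List (String × Bool)) → Int → (List (String × List (String × Bool))) × Int
  | [], c => ([], c)
  | (k, v) :: rest, c =>
    if (lookupOptim v).getD false then
      let v' := if c ≥ n then setOptimFalse v else v
      let p := aLoop n rest (c + 1)
      ((k, v') :: p.1, p.2)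
    else
      let p := aLoop n rest c
      ((k, v) :: p.1, p.2)

def reduce_constr_dict (constr_dict : List (String × List (String × Bool))) (n_jp_to_leave : Int) : (List (String × List (String × Bool))) × Bool :=
  let p := aLoop n_jp_to_leave constr_dict 0
  (p.1, decide (p.2 ≥ n_jp_to_leave))

-- ===== PORT B =====
-- new_dict[k]['optim'] = False: modify the first entry with key k
def disableAt : List (String × List (String × Bool)) → String → List (String × List (String × Bool))
  | [], _ => []
  | (k', v) :: r, k => if k' = k then (k', setOptimFalse v) :: r else (k', v) :: disableAt r k

def reduce_constr_dict_alt (constr_dict : List (String × List (String × Bool))) (n_jp_to_leave : Int) : (List (String × List (String × Bool))) × Bool :=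
  let optim_keys := (constr_dict.filter (fun kv => (lookupOptim kv.2).getD false)).map Prod.fst
  let new_dict := (PySem.List.slice optim_keys (some (max n_jp_to_leave 0)) none).foldl disableAt constr_dict
  (new_dict, decide ((optim_keys.length : Int) ≥ n_jp_to_leave))

-- ===== PRECONDITION & SPEC =====
-- Pre_ excludes (a) inner dicts with no "optim" key, on which Python A raises KeyError, and
-- (b) association lists with duplicate outer keys, which do not represent a Python dict
-- (the dict argument of A always has distinct keys).
def Pre_reduce_constr_dict (constr_dict : List (String × List (String × Bool))) (n_jp_to_leave : Int) : Prop :=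
  (constr_dict.map Prod.fst).Nodup ∧ ∀ kv ∈ constr_dict, "optim" ∈ kv.2.map Prod.fst
instance (constr_dict : List (String × List (String × Bool))) (n_jp_to_leave : Int) : Decidable (Pre_reduce_constr_dict constr_dict n_jp_to_leave) := by unfold Pre_reduce_constr_dict; infer_instance

def pvWitness_reduce_constr_dict : (List (String × List (String × Bool))) × Int :=
  ([("a", [("optim", true)]), ("b", [("optim", true), ("x", false)]), ("c", [("optim", false)])], 1)

def Spec_reduce_constr_dict (constr_dict : List (String × List (String × Bool))) (n_jp_to_leave : Int) (out : (List (String × List (String × Bool))) × Bool) : Prop := out = reduce_constr_dict_alt constr_dict n_jp_to_leave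
instance (constr_dict : List (String × List (String × Bool))) (n_jp_to_leave : Int) (out : (List (String × List (String × Bool))) × Bool) : Decidable (Spec_reduce_constr_dict constr_dict n_jp_to_leave out) := by unfold Spec_reduce_constr_dict; infer_instance

-- ===== CLAIM (what is proved, stated in full; the proofs are below) =====
def Claim_equal_reduce_constr_dict : Prop := ∀ (constr_dict : List (String × List (String × Bool))) (n_jp_to_leave : Int), Dom_reduce_constr_dict constr_dict n_jp_to_leave → Pre_reduce_constr_dict constr_dict n_jp_to_leave → Spec_reduce_constr_dict constr_dict n_jp_to_leave (reduce_constr_dict constr_dict n_jp_to_leave)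

-- ===== LEMMAS AND PROOFS =====
-- proof-side abbreviation for B's key list
def optKeys (cd : List (String × List (String × Bool))) : List String :=
  (cd.filter (fun kv => (lookupOptim kv.2).getD false)).map Prod.fst

lemma optKeys_subset_keys (cd : List (String × List (String × Bool))) :
    optKeys cd ⊆ cd.map Prod.fst := by
  intro x hx
  simp only [optKeys, List.mem_map, List.mem_filter] at hx ⊢
  obtain ⟨kv, ⟨h1, _⟩, h2⟩ := hx
  exact ⟨kv, h1, h2⟩

lemma foldl_disableAt_cons (K : List String) (k : String) (v : List (String × Bool))
    (rest : List (String × List (String × Bool))) (hk : k ∉ K) :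
    K.foldl disableAt ((k, v) :: rest) = (k, v) :: K.foldl disableAt rest := by
  induction K generalizing v rest with
  | nil => rfl
  | cons k' K ih =>
    have hne : ¬ (k = k') := fun h => hk (h ▸ List.mem_cons_self)
    simp only [List.foldl_cons, disableAt, if_neg hne]
    exact ih _ _ (fun h => hk (List.mem_cons_of_mem _ h))

lemma aLoop_eq (n : Int) (cd : List (String × List (String × Bool)))
    (hnd : (cd.map Prod.fst).Nodup) :
    ∀ c : Int, 0 ≤ c →
      aLoop n cd c =
        (((optKeys cd).drop (max (n - c) 0).toNat).foldl disableAt cd,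
          c + (optKeys cd).length) := by
  induction cd with
  | nil => intro c _; simp [aLoop, optKeys]
  | cons hd rest ih =>
    obtain ⟨k, v⟩ := hd
    simp only [List.map_cons, List.nodup_cons] at hnd
    obtain ⟨hk, hnd'⟩ := hnd
    have hknot : k ∉ optKeys rest := fun h => hk (optKeys_subset_keys rest h)
    intro c hc
    by_cases hov : (lookupOptim v).getD false
    · have hkeys : optKeys ((k, v) :: rest) = k :: optKeys rest := by
        simp [optKeys, hov]
      by_cases hcn : c ≥ n
      · have hm : (max (n - c) 0).toNat = 0 := by omega
        have hm' : (max (n - (c + 1)) 0).toNat = 0 := by omega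
        simp only [aLoop, hov, if_pos hcn, if_pos, ih hnd' (c + 1) (by omega), hkeys, hm, hm',
          List.drop_zero, List.foldl_cons, disableAt]
        rw [foldl_disableAt_cons _ _ _ _ hknot]
        simp only [Prod.mk.injEq, List.length_cons]
        exact ⟨trivial, by push_cast; ring⟩
      · have hme : (max (n - c) 0).toNat = (max (n - (c + 1)) 0).toNat + 1 := by omega
        have hdrop : ((k :: optKeys rest).drop (max (n - c) 0).toNat)
            = (optKeys rest).drop (max (n - (c + 1)) 0).toNat := by
          rw [hme]; rfl
        have hsub : k ∉ (optKeys rest).drop (max (n - (c + 1)) 0).toNat :=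
          fun h => hknot (List.drop_subset _ _ h)
        simp only [aLoop, hov, if_neg hcn, if_pos, ih hnd' (c + 1) (by omega), hkeys, hdrop]
        rw [foldl_disableAt_cons _ _ _ _ hsub]
        simp only [Prod.mk.injEq, List.length_cons]
        exact ⟨trivial, by push_cast; ring⟩
    · have hkeys : optKeys ((k, v) :: rest) = optKeys rest := by
        simp [optKeys, hov]
      have hsub : k ∉ (optKeys rest).drop (max (n - c) 0).toNat :=
        fun h => hknot (List.drop_subset _ _ h)
      simp only [aLoop, hov, if_neg, ih hnd' c hc, hkeys, Bool.false_eq_true, not_false_iff]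
      rw [foldl_disableAt_cons _ _ _ _ hsub]

-- ===== VERDICT (by name: the statement is the Claim_ definition above) =====
theorem reduce_constr_dict_spec : Claim_equal_reduce_constr_dict := by
  intro cd n _ hpre
  have h := aLoop_eq n cd hpre.1 0 le_rfl
  show ((aLoop n cd 0).1, decide ((aLoop n cd 0).2 ≥ n)) =
    ((PySem.List.slice ((cd.filter (fun kv => (lookupOptim kv.2).getD false)).map Prod.fst)
        (some (max n 0)) none).foldl disableAt cd,
      decide ((((cd.filter (fun kv => (lookupOptim kv.2).getD false)).map Prod.fst).length : Int) ≥ n))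
  have e : max (n - 0) 0 = max n 0 := by omega
  rw [PySem.List.slice_from _ (show (0:Int) ≤ max n 0 by omega), h, e]
  simp [optKeys]
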